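-- pv_equiv track=rewrite | github.com/aryaa192/AdventOfCode | Day03_2.py | first_bit_checker
-- ===== SOURCE A (Python) =====
-- def first_bit_checker(bit,j):
--     c_1 = []
--     c_0 = []
--     for i in range(len(bit)):  # 00100
--         if bit[i].startswith('1', j):
--             c_1.append(bit[i])
--         if bit[i].startswith('0', j):
--             c_0.append(bit[i])
--     if len(c_1) >= len(c_0):
--         return c_1
--     else:
--         return c_0
-- ===== SOURCE B (Python) =====
-- def first_bit_checker(bit, j):
--     n1 = sum(1 for x in bit if x.startswith('1', j))
--     n0 = sum(1 for x in bit if x.startswith('0', j))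
--     win = '1' if n1 >= n0 else '0'
--     return [x for x in bit if x.startswith(win, j)]
-- ===== Notes on version B (the rewrite author's own statement) =====
-- stated objective: alternative
-- what changed: Counts the '1'-prefixed and '0'-prefixed strings first, then builds only the winning group in one selective pass, instead of materialising both groups and comparing their lengths.
import Mathlib
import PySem

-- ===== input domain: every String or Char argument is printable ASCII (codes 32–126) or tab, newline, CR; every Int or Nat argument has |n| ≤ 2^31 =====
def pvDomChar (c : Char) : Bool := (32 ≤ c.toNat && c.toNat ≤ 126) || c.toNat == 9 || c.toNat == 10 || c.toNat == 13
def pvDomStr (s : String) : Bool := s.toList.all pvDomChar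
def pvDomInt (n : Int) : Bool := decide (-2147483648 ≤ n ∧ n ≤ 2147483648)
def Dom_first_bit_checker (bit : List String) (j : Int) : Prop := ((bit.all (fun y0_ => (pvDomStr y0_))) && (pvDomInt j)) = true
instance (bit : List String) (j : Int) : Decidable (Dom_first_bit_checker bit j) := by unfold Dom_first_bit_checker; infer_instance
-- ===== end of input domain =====

-- B changes the decomposition: count winners first, then build only the winning group; same O(n) cost (objective: alternative).
-- ===== PORT A =====
-- x.startswith(p, j): Python clamps the start like a slice, then compares; exact for the
-- nonempty prefixes "1"/"0" used here (for empty p Python differs when j > len(x), unused).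
def pySW (x : String) (p : String) (j : Int) : Bool :=
  PySem.Str.startswith (PySem.Str.slice x (some j) none) p

def first_bit_checker (bit : List String) (j : Int) : List String :=
  let r := (PySem.List.pyRange 0 (bit.length : Int) 1).foldl
    (fun (acc : List String × List String) i =>
      let x := PySem.List.pyGetD bit i ""
      (if pySW x "1" j then acc.1 ++ [x] else acc.1,
       if pySW x "0" j then acc.2 ++ [x] else acc.2)) ([], [])
  if r.2.length ≤ r.1.length then r.1 else r.2

-- ===== PORT B =====
def first_bit_checker_alt (bit : List String) (j : Int) : List String :=
  let n1 := bit.countP (fun x => pySW x "1" j)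
  let n0 := bit.countP (fun x => pySW x "0" j)
  let win := if n0 ≤ n1 then "1" else "0"
  bit.filter (fun x => pySW x win j)

-- ===== PRECONDITION & SPEC =====
def Spec_first_bit_checker (bit : List String) (j : Int) (out : List String) : Prop := out = first_bit_checker_alt bit j
instance (bit : List String) (j : Int) (out : List String) : Decidable (Spec_first_bit_checker bit j out) := by unfold Spec_first_bit_checker; infer_instance

-- ===== CLAIM (what is proved, stated in full; the proofs are below) =====
def Claim_equal_first_bit_checker : Prop := ∀ (bit : List String) (j : Int), Dom_first_bit_checker bit j → Spec_first_bit_checker bit j (first_bit_checker bit j)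

-- ===== LEMMAS AND PROOFS =====

-- ===== VERDICT (by name: the statement is the Claim_ definition above) =====
-- A's paired fold builds both filtered groups.
theorem pairFold (l : List String) (p q : String → Bool) (a b : List String) :
    l.foldl (fun acc x =>
      (if p x then acc.1 ++ [x] else acc.1, if q x then acc.2 ++ [x] else acc.2)) (a, b)
    = (a ++ l.filter p, b ++ l.filter q) := by
  induction l generalizing a b with
  | nil => simp
  | cons h t ih =>
    simp only [List.foldl_cons, List.filter_cons]
    split_ifs <;> simp [ih]

theorem first_bit_checker_spec : Claim_equal_first_bit_checker := by
  intro bit j _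
  unfold Spec_first_bit_checker first_bit_checker first_bit_checker_alt
  rw [PySem.List.foldl_pyRange_zero_pyGetD' bit ""
      (fun (acc : List String × List String) x =>
        (if pySW x "1" j then acc.1 ++ [x] else acc.1,
         if pySW x "0" j then acc.2 ++ [x] else acc.2)) ([], [])]
  rw [pairFold]
  simp only [List.nil_append, List.countP_eq_length_filter]
  by_cases h : (bit.filter (fun x => pySW x "0" j)).length ≤
      (bit.filter (fun x => pySW x "1" j)).length <;> simp [h]
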